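-- pv_equiv track=rewrite | github.com/azrael1865/Saraphis | independent_core/compression_systems/padic/padic_encoder.py | _add_padic_digits
-- ===== SOURCE A (Python) =====
-- from typing import Dict, Any, Optional, Tuple, List
--
-- def _add_padic_digits(digits1: List[int], digits2: List[int],
--                       prime: int) -> List[int]:
--     """Add two p-adic digit sequences with carry"""
--     result = []
--     carry = 0
--     max_len = max(len(digits1), len(digits2))
--
--     for i in range(max_len):
--         d1 = digits1[i] if i < len(digits1) else 0
--         d2 = digits2[i] if i < len(digits2) else 0
--
--         sum_digit = d1 + d2 + carry
--         result.append(sum_digit % prime)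
--         carry = sum_digit // prime
--
--     # Ensure result has correct length
--     while len(result) < len(digits1):
--         result.append(0)
--
--     return result[:len(digits1)]  # Truncate to original precision
-- ===== SOURCE B (Python) =====
-- def _add_padic_digits(digits1, digits2, prime):
--     """Add two p-adic digit sequences with carry (integer add + base conversion)."""
--     L = len(digits1)
--     n1 = 0
--     for d in reversed(digits1):
--         n1 = n1 * prime + d
--     n2 = 0
--     for d in reversed(digits2):
--         n2 = n2 * prime + d
--     total = n1 + n2
--     out = []
--     for _ in range(L):
--         total, r = divmod(total, prime)
--         out.append(r)
--     return out
-- ===== Notes on version B (the rewrite author's own statement) =====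
-- stated objective: alternative
-- what changed: Replaces the elementwise carry-propagation loop (with padding and truncation) by converting both digit lists to integers via Horner evaluation, adding them, and extracting len(digits1) digits back by repeated divmod.
import Mathlib
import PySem

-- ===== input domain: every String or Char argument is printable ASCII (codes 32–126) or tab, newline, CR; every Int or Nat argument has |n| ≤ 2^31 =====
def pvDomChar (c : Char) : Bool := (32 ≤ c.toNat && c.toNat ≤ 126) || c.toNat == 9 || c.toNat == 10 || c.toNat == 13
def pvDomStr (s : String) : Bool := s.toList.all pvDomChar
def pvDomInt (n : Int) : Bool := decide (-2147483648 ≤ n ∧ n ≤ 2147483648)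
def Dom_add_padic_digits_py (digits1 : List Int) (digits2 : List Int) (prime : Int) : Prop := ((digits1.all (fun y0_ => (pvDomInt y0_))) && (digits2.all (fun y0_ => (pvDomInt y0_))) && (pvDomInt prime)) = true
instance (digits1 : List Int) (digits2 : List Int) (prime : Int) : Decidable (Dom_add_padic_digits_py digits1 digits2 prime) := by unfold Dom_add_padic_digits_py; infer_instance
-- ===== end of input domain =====

-- B replaces A's elementwise carry-propagation loop by Horner-evaluating both digit
-- lists to integers, adding them, and extracting len(digits1) digits by repeated divmod
-- (alternative decomposition, similar cost).


-- ===== PORT A =====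
-- the `for i in range(max_len)` loop: state (result, carry), counted down by the
-- remaining number of iterations n, current index i
def pvALoop (digits1 digits2 : List Int) (prime : Int) (i : Nat) (n : Nat)
    (result : List Int) (carry : Int) : List Int :=
  match n with
  | 0 => result
  | n + 1 =>
    let d1 : Int := if (i : Int) < (digits1.length : Int) then digits1.getD i 0 else 0
    let d2 : Int := if (i : Int) < (digits2.length : Int) then digits2.getD i 0 else 0
    let sum_digit := d1 + d2 + carry
    pvALoop digits1 digits2 prime (i + 1) n
      (result ++ [PySem.Int.mod sum_digit prime]) (PySem.Int.floordiv sum_digit prime)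

-- the `while len(result) < len(digits1): result.append(0)` loop
def pvAPad (result : List Int) (L : Nat) : List Int :=
  if result.length < L then pvAPad (result ++ [0]) L else result
termination_by L - result.length
decreasing_by simp_all; omega

def add_padic_digits_py (digits1 : List Int) (digits2 : List Int) (prime : Int) : List Int :=
  let max_len := max digits1.length digits2.length
  let result := pvALoop digits1 digits2 prime 0 max_len [] 0
  -- result[:len(digits1)] : the bound is a nonnegative length, so it is List.take (exact)
  (pvAPad result digits1.length).take digits1.length

-- ===== PORT B =====
-- `n = 0; for d in reversed(ds): n = n * prime + d`
def pvHorner (ds : List Int) (prime : Int) : Int :=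
  ds.reverse.foldl (fun n d => n * prime + d) 0

-- `for _ in range(L): total, r = divmod(total, prime); out.append(r)`
def pvExtract (prime : Int) (total : Int) (L : Nat) : List Int :=
  match L with
  | 0 => []
  | L + 1 => PySem.Int.mod total prime :: pvExtract prime (PySem.Int.floordiv total prime) L

def add_padic_digits_py_alt (digits1 : List Int) (digits2 : List Int) (prime : Int) : List Int :=
  let total := pvHorner digits1 prime + pvHorner digits2 prime
  pvExtract prime total digits1.length

-- ===== PRECONDITION & SPEC =====
-- Pre_ excludes exactly the inputs where A raises ZeroDivisionError:
-- prime == 0 with at least one nonempty digit list.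
def Pre_add_padic_digits_py (digits1 : List Int) (digits2 : List Int) (prime : Int) : Prop :=
  prime ≠ 0 ∨ (digits1 = [] ∧ digits2 = [])
instance (digits1 : List Int) (digits2 : List Int) (prime : Int) : Decidable (Pre_add_padic_digits_py digits1 digits2 prime) := by unfold Pre_add_padic_digits_py; infer_instance
def pvWitness_add_padic_digits_py : List Int × List Int × Int := ([1, 2], [2, 2], 3)

def Spec_add_padic_digits_py (digits1 : List Int) (digits2 : List Int) (prime : Int) (out : List Int) : Prop := out = add_padic_digits_py_alt digits1 digits2 prime
instance (digits1 : List Int) (digits2 : List Int) (prime : Int) (out : List Int) : Decidable (Spec_add_padic_digits_py digits1 digits2 prime out) := by unfold Spec_add_padic_digits_py; infer_instance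

-- ===== CLAIM (what is proved, stated in full; the proofs are below) =====
def Claim_equal_add_padic_digits_py : Prop := ∀ (digits1 : List Int) (digits2 : List Int) (prime : Int), Dom_add_padic_digits_py digits1 digits2 prime → Pre_add_padic_digits_py digits1 digits2 prime → Spec_add_padic_digits_py digits1 digits2 prime (add_padic_digits_py digits1 digits2 prime)

-- ===== LEMMAS AND PROOFS =====

-- value of a digit list, head-first (positional / Horner form)
def pvVal (prime : Int) : List Int → Int
  | [] => 0
  | d :: ds => d + prime * pvVal prime ds

theorem pvHorner_eq_val (ds : List Int) (prime : Int) :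
    pvHorner ds prime = pvVal prime ds := by
  unfold pvHorner
  rw [List.foldl_reverse]
  induction ds with
  | nil => rfl
  | cons d ds ih => simp [pvVal, ← ih]; ring

theorem pvVal_head (prime : Int) (ds : List Int) :
    pvVal prime ds = ds.headD 0 + prime * pvVal prime ds.tail := by
  cases ds <;> simp [pvVal]

theorem pvMod_shift (a b p : Int) : PySem.Int.mod (a + p * b) p = PySem.Int.mod a p := by
  simp [PySem.Int.mod, Int.add_mul_fmod_self_left]

theorem pvFloordiv_shift (a b p : Int) (hp : p ≠ 0) :
    PySem.Int.floordiv (a + p * b) p = PySem.Int.floordiv a p + b := by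
  simp [PySem.Int.floordiv, Int.add_mul_fdiv_left, hp]

-- the carry loop computes exactly the digits extracted from the combined value
theorem pvALoop_eq_extract (prime : Int) (hp : prime ≠ 0) (n : Nat) :
    ∀ (xs ys : List Int) (i : Nat) (res : List Int) (c : Int),
    pvALoop xs ys prime i n res c =
      res ++ pvExtract prime (pvVal prime (xs.drop i) + pvVal prime (ys.drop i) + c) n := by
  induction n with
  | zero => intro xs ys i res c; simp [pvALoop, pvExtract]
  | succ n ih =>
    intro xs ys i res c
    have hx : (if (i : Int) < (xs.length : Int) then xs.getD i 0 else 0) = (xs.drop i).headD 0 := by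
      split_ifs with h
      · have hi : i < xs.length := by exact_mod_cast h
        rw [List.getD_eq_getElem _ _ hi]
        rw [List.headD_eq_head?_getD, List.head?_drop]
        simp [hi]
      · have hi : xs.length ≤ i := by omega
        simp [List.drop_eq_nil_of_le hi]
    have hy : (if (i : Int) < (ys.length : Int) then ys.getD i 0 else 0) = (ys.drop i).headD 0 := by
      split_ifs with h
      · have hi : i < ys.length := by exact_mod_cast h
        rw [List.getD_eq_getElem _ _ hi]
        rw [List.headD_eq_head?_getD, List.head?_drop]
        simp [hi]
      · have hi : ys.length ≤ i := by omega
        simp [List.drop_eq_nil_of_le hi]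
    simp only [pvALoop, pvExtract, hx, hy]
    rw [ih]
    have hdx : xs.drop (i + 1) = (xs.drop i).tail := by
      rw [List.tail_drop]
    have hdy : ys.drop (i + 1) = (ys.drop i).tail := by
      rw [List.tail_drop]
    set A := (xs.drop i).headD 0 + (ys.drop i).headD 0 + c with hA
    have hT : pvVal prime (xs.drop i) + pvVal prime (ys.drop i) + c
        = A + prime * (pvVal prime (xs.drop i).tail + pvVal prime (ys.drop i).tail) := by
      rw [pvVal_head prime (xs.drop i), pvVal_head prime (ys.drop i)]; ring
    rw [hdx, hdy, hT, pvMod_shift, pvFloordiv_shift _ _ _ hp]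
    simp [List.append_assoc]
    ring_nf

theorem pvExtract_length (prime t : Int) (n : Nat) : (pvExtract prime t n).length = n := by
  induction n generalizing t with
  | zero => rfl
  | succ n ih => simp [pvExtract, ih]

theorem pvExtract_take (prime t : Int) (L n : Nat) (h : L ≤ n) :
    (pvExtract prime t n).take L = pvExtract prime t L := by
  induction n generalizing t L with
  | zero => interval_cases L; rfl
  | succ n ih =>
    cases L with
    | zero => rfl
    | succ L =>
      simp only [pvExtract, List.take_succ_cons]
      rw [ih (PySem.Int.floordiv t prime) L (by omega)]

theorem pvAPad_of_le (res : List Int) (L : Nat) (h : L ≤ res.length) : pvAPad res L = res := by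
  unfold pvAPad
  simp [Nat.not_lt.mpr h]

-- ===== VERDICT (by name: the statement is the Claim_ definition above) =====
theorem add_padic_digits_py_spec : Claim_equal_add_padic_digits_py := by
  intro digits1 digits2 prime _hdom hpre
  unfold Spec_add_padic_digits_py add_padic_digits_py add_padic_digits_py_alt
  rcases hpre with hp | ⟨h1, h2⟩
  · simp only [pvALoop_eq_extract prime hp, List.drop_zero, List.nil_append]
    rw [pvAPad_of_le _ _ (by rw [pvExtract_length]; exact le_max_left _ _)]
    rw [pvExtract_take _ _ _ _ (le_max_left _ _)]
    rw [pvHorner_eq_val, pvHorner_eq_val]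
    ring_nf
  · subst h1; subst h2; rfl
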